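-- pv_equiv track=rewrite | github.com/dark-red-one/aurora-ai-robbiverse | apps/archive-legacy/backend/app/services/semantic_search.py | _create_message_snippet
-- ===== SOURCE A (Python) =====
-- from typing import Dict, List, Any, Optional, Tuple
--
-- def _create_message_snippet(
--
--     content: str,
--     terms: List[str],
--     phrases: List[str],
--     max_length: int = 200
-- ) -> str:
--     """Create a snippet of message content with search terms highlighted"""
--
--     # Find the best position to start the snippet
--     all_search_items = terms + phrases
--     best_pos = 0
--     best_score = 0
--
--     for item in all_search_items:
--         pos = content.lower().find(item.lower())
--         if pos >= 0:
--             # Count nearby search terms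
--             nearby_score = sum(1 for other_item in all_search_items
--                              if abs(content.lower().find(other_item.lower()) - pos) < 100)
--             if nearby_score > best_score:
--                 best_score = nearby_score
--                 best_pos = max(0, pos - 50)
--
--     # Extract snippet
--     snippet = content[best_pos:best_pos + max_length]
--     if best_pos > 0:
--         snippet = "..." + snippet
--     if len(content) > best_pos + max_length:
--         snippet += "..."
--
--     return snippet.strip()
-- ===== SOURCE B (Python) =====
-- def _create_message_snippet(content, terms, phrases, max_length=200):
--     """Create a snippet of message content with search terms highlighted"""
--     content_lower = content.lower()
--     # every item's position computed ONCE
--     positions = [content_lower.find(item.lower()) for item in terms + phrases]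
--     # one sweep over the sorted positions with two pointers:
--     # counts[p] = number of positions q with |q - p| < 100
--     sp = sorted(positions)
--     n = len(sp)
--     counts = {}
--     lo = 0
--     hi = 0
--     for p in sp:
--         while hi < n and sp[hi] <= p + 99:
--             hi += 1
--         while lo < n and sp[lo] < p - 99:
--             lo += 1
--         counts[p] = hi - lo
--     best_pos = 0
--     best_score = 0
--     for p in positions:
--         if p >= 0 and counts[p] > best_score:
--             best_score = counts[p]
--             best_pos = max(0, p - 50)
--     snippet = content[best_pos:best_pos + max_length]
--     if best_pos > 0:
--         snippet = "..." + snippet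
--     if len(content) > best_pos + max_length:
--         snippet += "..."
--     return snippet.strip()
-- ===== Notes on version B (the rewrite author's own statement) =====
-- stated objective: faster
-- what changed: B lowercases the content once and computes each item's find-position exactly once, then replaces A's nested rescan (per item, re-running every lowercase+find to count neighbours) by sorting the positions and sweeping them once with two pointers to precompute each position's neighbour count in a dict.
import Mathlib
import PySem

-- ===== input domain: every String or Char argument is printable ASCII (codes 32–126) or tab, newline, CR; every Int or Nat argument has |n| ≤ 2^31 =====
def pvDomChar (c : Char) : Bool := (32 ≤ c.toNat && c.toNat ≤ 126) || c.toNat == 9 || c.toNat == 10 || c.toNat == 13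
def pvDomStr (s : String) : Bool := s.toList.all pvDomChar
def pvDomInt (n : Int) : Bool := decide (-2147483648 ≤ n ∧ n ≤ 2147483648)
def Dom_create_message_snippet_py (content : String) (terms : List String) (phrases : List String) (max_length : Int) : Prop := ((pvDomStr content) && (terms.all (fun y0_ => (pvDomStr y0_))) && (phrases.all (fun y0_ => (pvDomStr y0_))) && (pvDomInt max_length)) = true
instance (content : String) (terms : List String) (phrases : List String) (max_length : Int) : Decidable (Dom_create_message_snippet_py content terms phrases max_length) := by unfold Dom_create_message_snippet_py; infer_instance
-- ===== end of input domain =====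

-- B computes every lowercase find once and replaces A's quadratic nested find-scans by a
-- sorted positions list swept once with two pointers (faster, no repeated string scans).

-- ===== PORT A =====
def create_message_snippet_py (content : String) (terms : List String) (phrases : List String) (max_length : Int) : String :=
  let all_search_items := terms ++ phrases
  let st := all_search_items.foldl (fun (st : Int × Int) item =>
      let pos := PySem.Str.find (PySem.Str.lower content) (PySem.Str.lower item)
      if pos ≥ 0 then
        let nearby_score := all_search_items.foldl (fun (acc : Int) other_item =>
            if |PySem.Str.find (PySem.Str.lower content) (PySem.Str.lower other_item) - pos| < 100
            then acc + 1 else acc) 0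
        if nearby_score > st.2 then (max 0 (pos - 50), nearby_score) else st
      else st) (0, 0)
  let best_pos := st.1
  let snippet := PySem.Str.slice content (some best_pos) (some (best_pos + max_length))
  let snippet := if best_pos > 0 then "..." ++ snippet else snippet
  let snippet := if PySem.Str.len content > best_pos + max_length then snippet ++ "..." else snippet
  PySem.Str.strip snippet

-- ===== PORT B =====
-- 'while j < n and pred(sp[j]): j += 1' (the two pointer-advance while loops of Source B)
def pvAdvance (sp : List Int) (pred : Int → Bool) (j : Nat) : Nat :=
  if h : j < sp.length then
    if pred (sp[j]'h) then pvAdvance sp pred (j + 1) else j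
  else j
termination_by sp.length - j

def create_message_snippet_py_alt (content : String) (terms : List String) (phrases : List String) (max_length : Int) : String :=
  let content_lower := PySem.Str.lower content
  let positions := (terms ++ phrases).map (fun item => PySem.Str.find content_lower (PySem.Str.lower item))
  let sp := PySem.List.sorted positions (fun x => x) false
  -- one sweep with state (counts, lo, hi); counts[p] looked up with getD (every key is present)
  let sweep := sp.foldl (fun (st : PySem.Dict Int Int × Nat × Nat) p =>
      let hi := pvAdvance sp (fun q => q ≤ p + 99) st.2.2
      let lo := pvAdvance sp (fun q => q < p - 99) st.2.1
      (st.1.insert p ((hi : Int) - (lo : Int)), lo, hi)) (PySem.Dict.empty, 0, 0)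
  let counts := sweep.1
  let st := positions.foldl (fun (st : Int × Int) p =>
      if p ≥ 0 ∧ counts.getD p 0 > st.2 then (max 0 (p - 50), counts.getD p 0) else st) (0, 0)
  let best_pos := st.1
  let snippet := PySem.Str.slice content (some best_pos) (some (best_pos + max_length))
  let snippet := if best_pos > 0 then "..." ++ snippet else snippet
  let snippet := if PySem.Str.len content > best_pos + max_length then snippet ++ "..." else snippet
  PySem.Str.strip snippet

-- ===== PRECONDITION & SPEC =====
def Spec_create_message_snippet_py (content : String) (terms : List String) (phrases : List String) (max_length : Int) (out : String) : Prop := out = create_message_snippet_py_alt content terms phrases max_length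
instance (content : String) (terms : List String) (phrases : List String) (max_length : Int) (out : String) : Decidable (Spec_create_message_snippet_py content terms phrases max_length out) := by unfold Spec_create_message_snippet_py; infer_instance

-- ===== CLAIM (what is proved, stated in full; the proofs are below) =====
def Claim_equal_create_message_snippet_py : Prop := ∀ (content : String) (terms : List String) (phrases : List String) (max_length : Int), Dom_create_message_snippet_py content terms phrases max_length → Spec_create_message_snippet_py content terms phrases max_length (create_message_snippet_py content terms phrases max_length)

-- ===== LEMMAS AND PROOFS =====

-- In a ≤-sorted list, a downward-closed predicate holds exactly on the first countP positions.
theorem pv_char (pred : Int → Bool) (hmono : ∀ a b : Int, a ≤ b → pred b = true → pred a = true) :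
    ∀ (sp : List Int), sp.Pairwise (· ≤ ·) →
      ∀ i (h : i < sp.length), (pred sp[i] = true ↔ i < sp.countP pred) := by
  intro sp
  induction sp with
  | nil => intro _ i h; simp at h
  | cons x tl ih =>
    intro hpw i h
    rcases List.pairwise_cons.mp hpw with ⟨hx, htl⟩
    by_cases hpx : pred x = true
    · cases i with
      | zero => simp [hpx]
      | succ j =>
        simp only [List.getElem_cons_succ]
        rw [ih htl j (by simpa using h)]
        simp [hpx]
    · have htl0 : tl.countP pred = 0 := List.countP_eq_zero.mpr (fun y hy hc =>
        hpx (hmono x y (hx y hy) hc))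
      cases i with
      | zero => simp [hpx, htl0]
      | succ j =>
        have hj : j < tl.length := by simpa using h
        have : ¬ pred tl[j] = true := by
          have := List.countP_eq_zero.mp htl0 tl[j] (List.getElem_mem hj)
          simpa using this
        simp [hpx, htl0, List.getElem_cons_succ, this]

-- the pointer-advance loop lands on countP when started at or below it
theorem pv_adv_aux (sp : List Int) (pred : Int → Bool)
    (hmono : ∀ a b : Int, a ≤ b → pred b = true → pred a = true)
    (hs : sp.Pairwise (· ≤ ·)) :
    ∀ fuel j, sp.length - j ≤ fuel → j ≤ sp.countP pred → pvAdvance sp pred j = sp.countP pred := by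
  intro fuel
  induction fuel with
  | zero =>
    intro j hf hj
    have hc : sp.countP pred ≤ sp.length := List.countP_le_length
    unfold pvAdvance
    rw [dif_neg (by omega)]
    omega
  | succ n ih =>
    intro j hf hj
    unfold pvAdvance
    by_cases h : j < sp.length
    · rw [dif_pos h]
      by_cases hp : pred (sp[j]'h) = true
      · rw [if_pos hp]
        have : j < sp.countP pred := (pv_char pred hmono sp hs j h).mp hp
        exact ih (j + 1) (by omega) (by omega)
      · rw [if_neg hp]
        have : ¬ j < sp.countP pred := fun hc => hp ((pv_char pred hmono sp hs j h).mpr hc)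
        omega
    · rw [dif_neg h]
      have hc : sp.countP pred ≤ sp.length := List.countP_le_length
      omega

theorem pv_adv_spec (sp : List Int) (pred : Int → Bool)
    (hmono : ∀ a b : Int, a ≤ b → pred b = true → pred a = true)
    (hs : sp.Pairwise (· ≤ ·)) :
    ∀ j, j ≤ sp.countP pred → pvAdvance sp pred j = sp.countP pred :=
  fun j hj => pv_adv_aux sp pred hmono hs sp.length j (by omega) hj

-- the counts dict produced by the sweep maps every position to its two-pointer window count
theorem pv_sweep (sp : List Int) (hs : sp.Pairwise (· ≤ ·)) :
    ∀ (rest done : List Int) (lo hi : Nat) (d : PySem.Dict Int Int),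
      rest.Pairwise (· ≤ ·) →
      (∀ q ∈ rest, lo ≤ sp.countP (fun x => x < q - 99)) →
      (∀ q ∈ rest, hi ≤ sp.countP (fun x => x ≤ q + 99)) →
      (∀ q ∈ done, d.getD q 0 = (sp.countP (fun x => x ≤ q + 99) : Int) - (sp.countP (fun x => x < q - 99) : Int)) →
      ∀ q ∈ done ++ rest,
        (rest.foldl (fun (st : PySem.Dict Int Int × Nat × Nat) p =>
            let hi := pvAdvance sp (fun q => q ≤ p + 99) st.2.2
            let lo := pvAdvance sp (fun q => q < p - 99) st.2.1
            (st.1.insert p ((hi : Int) - (lo : Int)), lo, hi)) (d, lo, hi)).1.getD q 0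
          = (sp.countP (fun x => x ≤ q + 99) : Int) - (sp.countP (fun x => x < q - 99) : Int) := by
  intro rest
  induction rest with
  | nil =>
    intro done lo hi d _ _ _ hd q hq
    simpa using hd q (by simpa using hq)
  | cons p rest ih =>
    intro done lo hi d hpw hlo hhi hd q hq
    rcases List.pairwise_cons.mp hpw with ⟨hple, hpw'⟩
    simp only [List.foldl_cons]
    have hhi' : pvAdvance sp (fun x => x ≤ p + 99) hi = sp.countP (fun x => x ≤ p + 99) :=
      pv_adv_spec sp _ (fun a b hab hb => by simp only [decide_eq_true_eq] at hb ⊢; omega) hs hi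
        (hhi p (List.mem_cons_self))
    have hlo' : pvAdvance sp (fun x => x < p - 99) lo = sp.countP (fun x => x < p - 99) :=
      pv_adv_spec sp _ (fun a b hab hb => by simp only [decide_eq_true_eq] at hb ⊢; omega) hs lo
        (hlo p (List.mem_cons_self))
    have := ih (done ++ [p]) (sp.countP (fun x => x < p - 99)) (sp.countP (fun x => x ≤ p + 99))
        (d.insert p ((sp.countP (fun x => x ≤ p + 99) : Int) - (sp.countP (fun x => x < p - 99) : Int)))
        hpw'
        (fun r hr => List.countP_mono_left (fun x _ hx => by
            have hpr := hple r hr; simp only [decide_eq_true_eq] at hx ⊢; omega))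
        (fun r hr => List.countP_mono_left (fun x _ hx => by
            have hpr := hple r hr; simp only [decide_eq_true_eq] at hx ⊢; omega))
        (fun r hr => by
          rw [PySem.Dict.getD_insert]
          rcases List.mem_append.mp hr with hr | hr
          · by_cases hrp : r = p
            · simp [hrp]
            · rw [if_neg hrp]; exact hd r hr
          · simp_all)
        q (by simp at hq ⊢; tauto)
    simp only [hhi', hlo']
    convert this using 3

-- |q - p| < 100 window count as a difference of prefix counts
theorem pv_window (l : List Int) (p : Int) :
    l.countP (fun q => decide (|q - p| < 100)) + l.countP (fun x => x < p - 99)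
      = l.countP (fun x => x ≤ p + 99) := by
  induction l with
  | nil => simp
  | cons x tl ih =>
    simp only [List.countP_cons]
    have hx : (decide (|x - p| < 100) = true ↔ -100 < x - p ∧ x - p < 100) := by
      simp [abs_lt]
    split_ifs with h1 h2 h3 <;>
      (try rw [hx] at h1) <;> simp only [decide_eq_true_eq] at * <;> omega

-- the two best-position folds agree
theorem pv_folds (content : String) (items : List String) :
    items.foldl (fun (st : Int × Int) item =>
      let pos := PySem.Str.find (PySem.Str.lower content) (PySem.Str.lower item)
      if pos ≥ 0 then
        let nearby_score := items.foldl (fun (acc : Int) other_item =>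
            if |PySem.Str.find (PySem.Str.lower content) (PySem.Str.lower other_item) - pos| < 100
            then acc + 1 else acc) 0
        if nearby_score > st.2 then (max 0 (pos - 50), nearby_score) else st
      else st) (0, 0)
    = (items.map (fun item => PySem.Str.find (PySem.Str.lower content) (PySem.Str.lower item))).foldl
        (fun (st : Int × Int) p =>
          if p ≥ 0 ∧ ((PySem.List.sorted (items.map (fun item => PySem.Str.find (PySem.Str.lower content) (PySem.Str.lower item))) (fun x => x) false).foldl
              (fun (st : PySem.Dict Int Int × Nat × Nat) p =>
                let hi := pvAdvance (PySem.List.sorted (items.map (fun item => PySem.Str.find (PySem.Str.lower content) (PySem.Str.lower item))) (fun x => x) false) (fun q => q ≤ p + 99) st.2.2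
                let lo := pvAdvance (PySem.List.sorted (items.map (fun item => PySem.Str.find (PySem.Str.lower content) (PySem.Str.lower item))) (fun x => x) false) (fun q => q < p - 99) st.2.1
                (st.1.insert p ((hi : Int) - (lo : Int)), lo, hi)) (PySem.Dict.empty, 0, 0)).1.getD p 0 > st.2
          then (max 0 (p - 50), ((PySem.List.sorted (items.map (fun item => PySem.Str.find (PySem.Str.lower content) (PySem.Str.lower item))) (fun x => x) false).foldl
              (fun (st : PySem.Dict Int Int × Nat × Nat) p =>
                let hi := pvAdvance (PySem.List.sorted (items.map (fun item => PySem.Str.find (PySem.Str.lower content) (PySem.Str.lower item))) (fun x => x) false) (fun q => q ≤ p + 99) st.2.2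
                let lo := pvAdvance (PySem.List.sorted (items.map (fun item => PySem.Str.find (PySem.Str.lower content) (PySem.Str.lower item))) (fun x => x) false) (fun q => q < p - 99) st.2.1
                (st.1.insert p ((hi : Int) - (lo : Int)), lo, hi)) (PySem.Dict.empty, 0, 0)).1.getD p 0)
          else st) (0, 0) := by
  set f : String → Int := fun item => PySem.Str.find (PySem.Str.lower content) (PySem.Str.lower item) with hf
  set positions : List Int := items.map f with hpos
  set sp : List Int := PySem.List.sorted positions (fun x => x) false with hsp
  set counts : PySem.Dict Int Int := (sp.foldl
      (fun (st : PySem.Dict Int Int × Nat × Nat) p =>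
        let hi := pvAdvance sp (fun q => q ≤ p + 99) st.2.2
        let lo := pvAdvance sp (fun q => q < p - 99) st.2.1
        (st.1.insert p ((hi : Int) - (lo : Int)), lo, hi)) (PySem.Dict.empty, 0, 0)).1 with hcnt
  have hsp_pw : sp.Pairwise (· ≤ ·) := by
    simpa [hsp] using PySem.List.sorted_pairwise (xs := positions) (key := fun x => x)
  have hperm : sp.Perm positions := PySem.List.sorted_perm positions _ _
  have hcounts : ∀ p ∈ positions,
      counts.getD p 0 = (positions.countP (fun q => decide (|q - p| < 100)) : Int) := by
    intro p hp
    have hmem : p ∈ sp := by rw [hsp, PySem.List.mem_sorted]; exact hp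
    have h1 := pv_sweep sp hsp_pw sp [] 0 0 PySem.Dict.empty hsp_pw
      (fun _ _ => Nat.zero_le _) (fun _ _ => Nat.zero_le _) (by simp) p (by simpa using hmem)
    rw [hcnt, h1]
    have hw := pv_window positions p
    have e1 : sp.countP (fun x => x ≤ p + 99) = positions.countP (fun x => x ≤ p + 99) :=
      hperm.countP_eq _
    have e2 : sp.countP (fun x => x < p - 99) = positions.countP (fun x => x < p - 99) :=
      hperm.countP_eq _
    rw [e1, e2]
    omega
  rw [List.foldl_map]
  apply PySem.List.foldl_congr_mem
  intro st item hit
  dsimp only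
  have hnear : items.foldl (fun (acc : Int) other_item =>
      if |f other_item - f item| < 100 then acc + 1 else acc) 0
      = counts.getD (f item) 0 := by
    have h2 : (items.map f).foldl (fun (acc : Int) q =>
        if |q - f item| < 100 then acc + 1 else acc) 0
        = items.foldl (fun (acc : Int) other_item =>
            if |f other_item - f item| < 100 then acc + 1 else acc) 0 := List.foldl_map
    rw [← h2, PySem.List.foldl_ite_add_one, hcounts (f item) (List.mem_map_of_mem hit)]
    simp [hpos, List.countP_map]
  rw [hnear]
  by_cases h0 : f item ≥ 0
  · rw [if_pos h0]
    by_cases hgt : counts.getD (f item) 0 > st.2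
    · rw [if_pos hgt, if_pos ⟨h0, hgt⟩]
    · rw [if_neg hgt, if_neg (fun h => hgt h.2)]
  · rw [if_neg h0, if_neg (fun h => h0 h.1)]

-- ===== VERDICT (by name: the statement is the Claim_ definition above) =====
theorem create_message_snippet_py_spec : Claim_equal_create_message_snippet_py := by
  intro content terms phrases max_length _
  unfold Spec_create_message_snippet_py
  unfold create_message_snippet_py create_message_snippet_py_alt
  dsimp only
  rw [pv_folds content (terms ++ phrases)]
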